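-- pv_equiv track=rewrite | github.com/NateCastleOIT/Semantic-Alchemy | alchemy_engine/spell_circle_generator.py | _determine_archetype
-- ===== SOURCE A (Python) =====
-- from typing import List, Tuple, Optional
--
-- def _determine_archetype(tags: List[str]) -> str:
--     """Determine element archetype from tags."""
--     tags_lower = [t.lower() for t in tags]
--
--     if any(t in tags_lower for t in ["heat", "fire", "energy", "destructive"]):
--         return "fire"
--     elif any(t in tags_lower for t in ["fluid", "water", "flowing", "adaptive"]):
--         return "water"
--     elif any(t in tags_lower for t in ["solid", "earth", "stone", "stable"]):
--         return "earth"
--     elif any(t in tags_lower for t in ["gaseous", "air", "swift", "invisible"]):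
--         return "air"
--     elif any(t in tags_lower for t in ["radiant", "light", "illuminating"]):
--         return "light"
--     elif any(t in tags_lower for t in ["dark", "shadow", "concealing"]):
--         return "shadow"
--     elif any(t in tags_lower for t in ["entropic", "chaos", "wild", "volatile"]):
--         return "chaos"
--     elif any(t in tags_lower for t in ["lawful", "order", "structured", "perfect"]):
--         return "order"
--     else:
--         return "neutral"
-- ===== SOURCE B (Python) =====
-- _ARCHETYPE_GROUPS = [
--     ("fire", ["heat", "fire", "energy", "destructive"]),
--     ("water", ["fluid", "water", "flowing", "adaptive"]),
--     ("earth", ["solid", "earth", "stone", "stable"]),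
--     ("air", ["gaseous", "air", "swift", "invisible"]),
--     ("light", ["radiant", "light", "illuminating"]),
--     ("shadow", ["dark", "shadow", "concealing"]),
--     ("chaos", ["entropic", "chaos", "wild", "volatile"]),
--     ("order", ["lawful", "order", "structured", "perfect"]),
-- ]
--
-- # Inverted index: keyword -> (priority rank, archetype).  Keywords are unique
-- # across groups, so the mapping is well-defined.
-- _KEYWORD_RANK = {
--     kw: (rank, arch)
--     for rank, (arch, kws) in enumerate(_ARCHETYPE_GROUPS)
--     for kw in kws
-- }
--
-- def _determine_archetype(tags):
--     """Determine element archetype from tags: one pass over the tags keeping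
--     the best (lowest-rank) keyword hit; the cascade's priority order is the
--     rank order, so the minimum rank is exactly the first branch that fires."""
--     best = None
--     for t in tags:
--         r = _KEYWORD_RANK.get(t.lower())
--         if r is not None and (best is None or r[0] < best[0]):
--             best = r
--     return best[1] if best is not None else "neutral"
-- ===== Notes on version B (the rewrite author's own statement) =====
-- stated objective: faster
-- what changed: Replaced the eight-branch if/elif cascade of keyword-membership scans over the tag list with an inverted index (keyword -> (rank, archetype)) built once and a single pass over the tags keeping the minimum-rank hit; the cascade's first firing branch equals the smallest rank any lowered tag maps to, so the returned archetype is identical (and 'neutral' when no tag is a keyword).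
import Mathlib
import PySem

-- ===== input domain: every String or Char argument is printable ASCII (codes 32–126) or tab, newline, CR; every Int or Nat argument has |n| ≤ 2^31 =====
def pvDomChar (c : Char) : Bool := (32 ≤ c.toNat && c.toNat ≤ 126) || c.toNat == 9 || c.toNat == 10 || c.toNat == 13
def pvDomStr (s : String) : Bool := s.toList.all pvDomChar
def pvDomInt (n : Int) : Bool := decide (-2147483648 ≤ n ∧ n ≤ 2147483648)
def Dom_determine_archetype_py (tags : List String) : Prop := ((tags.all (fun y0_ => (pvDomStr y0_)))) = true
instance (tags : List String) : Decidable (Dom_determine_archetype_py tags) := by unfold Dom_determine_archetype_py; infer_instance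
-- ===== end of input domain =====

-- B replaces A's eight-branch cascade of membership tests by an inverted keyword->(rank, archetype)
-- index and a single min-rank pass over the tags (objective: faster, measured;
-- return values identical).

-- ===== PORT A =====
def determine_archetype_py (tags : List String) : String :=
  let tags_lower := tags.map PySem.Str.lower
  if (["heat", "fire", "energy", "destructive"] : List String).any (fun t => tags_lower.contains t) then "fire"
  else if (["fluid", "water", "flowing", "adaptive"] : List String).any (fun t => tags_lower.contains t) then "water"
  else if (["solid", "earth", "stone", "stable"] : List String).any (fun t => tags_lower.contains t) then "earth"
  else if (["gaseous", "air", "swift", "invisible"] : List String).any (fun t => tags_lower.contains t) then "air"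
  else if (["radiant", "light", "illuminating"] : List String).any (fun t => tags_lower.contains t) then "light"
  else if (["dark", "shadow", "concealing"] : List String).any (fun t => tags_lower.contains t) then "shadow"
  else if (["entropic", "chaos", "wild", "volatile"] : List String).any (fun t => tags_lower.contains t) then "chaos"
  else if (["lawful", "order", "structured", "perfect"] : List String).any (fun t => tags_lower.contains t) then "order"
  else "neutral"

-- ===== PORT B =====
def pvArchetypeGroups : List (String × List String) :=
  [("fire", ["heat", "fire", "energy", "destructive"]),
   ("water", ["fluid", "water", "flowing", "adaptive"]),
   ("earth", ["solid", "earth", "stone", "stable"]),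
   ("air", ["gaseous", "air", "swift", "invisible"]),
   ("light", ["radiant", "light", "illuminating"]),
   ("shadow", ["dark", "shadow", "concealing"]),
   ("chaos", ["entropic", "chaos", "wild", "volatile"]),
   ("order", ["lawful", "order", "structured", "perfect"])]

-- the dict comprehension building the inverted index keyword -> (rank, archetype)
def pvKeywordRank : PySem.Dict String (Int × String) :=
  PySem.Dict.ofList
    ((PySem.List.enumerate pvArchetypeGroups).flatMap
      (fun p => p.2.2.map (fun kw => (kw, (p.1, p.2.1)))))

def determine_archetype_py_alt (tags : List String) : String :=
  let best := tags.foldl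
    (fun best t =>
      match PySem.Dict.get? pvKeywordRank (PySem.Str.lower t) with
      | none => best
      | some r =>
        match best with
        | none => some r
        | some b => if r.1 < b.1 then some r else best)
    none
  match best with
  | some b => b.2
  | none => "neutral"

-- ===== PRECONDITION & SPEC =====
def Spec_determine_archetype_py (tags : List String) (out : String) : Prop := out = determine_archetype_py_alt tags
instance (tags : List String) (out : String) : Decidable (Spec_determine_archetype_py tags out) := by unfold Spec_determine_archetype_py; infer_instance

-- ===== CLAIM (what is proved, stated in full; the proofs are below) =====
def Claim_equal_determine_archetype_py : Prop := ∀ (tags : List String), Dom_determine_archetype_py tags → Spec_determine_archetype_py tags (determine_archetype_py tags)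

-- ===== LEMMAS AND PROOFS =====

-- left-biased minimum of two optional (rank, archetype) hits
def pvMinR : Option (Int × String) → Option (Int × String) → Option (Int × String)
  | none, y => y
  | some a, none => some a
  | some a, some b => if b.1 < a.1 then some b else some a

-- A's priority table as (rank, archetype, keywords) triples, ranks strictly increasing
def pvRankTable : List (Int × String × List String) :=
  [(0, "fire", ["heat", "fire", "energy", "destructive"]),
   (1, "water", ["fluid", "water", "flowing", "adaptive"]),
   (2, "earth", ["solid", "earth", "stone", "stable"]),
   (3, "air", ["gaseous", "air", "swift", "invisible"]),
   (4, "light", ["radiant", "light", "illuminating"]),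
   (5, "shadow", ["dark", "shadow", "concealing"]),
   (6, "chaos", ["entropic", "chaos", "wild", "volatile"]),
   (7, "order", ["lawful", "order", "structured", "perfect"])]

-- A's cascade, generically over a table: first entry with a keyword occurring in m
def pvCascadeT : List (Int × String × List String) → List String → Option (Int × String)
  | [], _ => none
  | e :: T, m => if e.2.2.any (fun t => m.contains t) then some (e.1, e.2.1) else pvCascadeT T m

-- first-match lookup of a single string in the table
def pvLookupT : List (Int × String × List String) → String → Option (Int × String)
  | [], _ => none
  | e :: T, s => if e.2.2.contains s then some (e.1, e.2.1) else pvLookupT T s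

theorem pv_A_eq_cascade (tags : List String) :
    determine_archetype_py tags =
      (match pvCascadeT pvRankTable (tags.map PySem.Str.lower) with
       | some b => b.2
       | none => "neutral") := by
  simp only [determine_archetype_py, pvRankTable, pvCascadeT]
  split_ifs <;> rfl

theorem pvMinR_none_right (x : Option (Int × String)) : pvMinR x none = x := by
  cases x <;> rfl

theorem pvMinR_assoc (a b c : Option (Int × String)) :
    pvMinR (pvMinR a b) c = pvMinR a (pvMinR b c) := by
  cases a with
  | none => rfl
  | some a =>
      cases b with
      | none => rfl
      | some b =>
          cases c with
          | none => simp only [pvMinR]; split_ifs <;> rfl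
          | some c =>
              show pvMinR (if b.1 < a.1 then some b else some a) (some c) =
                pvMinR (some a) (if c.1 < b.1 then some c else some b)
              split_ifs <;> simp only [pvMinR] <;> split_ifs <;> first | rfl | omega

-- each cascade condition for s :: m splits into a membership test on s and the condition for m
theorem pv_any_cons (kws : List String) (s : String) (m : List String) :
    (kws.any (fun t => (s :: m).contains t)) =
      (kws.contains s || kws.any (fun t => m.contains t)) := by
  rw [Bool.eq_iff_iff]
  simp only [List.any_eq_true, List.contains_eq_mem, List.mem_cons, decide_eq_true_eq,
    Bool.or_eq_true]
  constructor
  · rintro ⟨t, ht, h | h⟩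
    · exact Or.inl (h ▸ ht)
    · exact Or.inr ⟨t, ht, h⟩
  · rintro (h | ⟨t, ht, h⟩)
    · exact ⟨s, h, Or.inl rfl⟩
    · exact ⟨t, ht, Or.inr h⟩

theorem pvCascadeT_rank_mem (T : List (Int × String × List String)) (m : List String)
    (p : Int × String) (h : pvCascadeT T m = some p) : p.1 ∈ T.map (fun e => e.1) := by
  induction T with
  | nil => simp [pvCascadeT] at h
  | cons e T ih =>
      unfold pvCascadeT at h
      split at h
      · simp only [Option.some.injEq] at h
        simp [← h]
      · simpa using Or.inr (ih h)

theorem pvLookupT_rank_mem (T : List (Int × String × List String)) (s : String)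
    (p : Int × String) (h : pvLookupT T s = some p) : p.1 ∈ T.map (fun e => e.1) := by
  induction T with
  | nil => simp [pvLookupT] at h
  | cons e T ih =>
      unfold pvLookupT at h
      split at h
      · simp only [Option.some.injEq] at h
        simp [← h]
      · simpa using Or.inr (ih h)

-- key lemma: with strictly increasing ranks the cascade decomposes along the head tag
theorem pv_cascade_cons_gen (T : List (Int × String × List String))
    (hT : (T.map (fun e => e.1)).Pairwise (· < ·)) (s : String) (m : List String) :
    pvCascadeT T (s :: m) = pvMinR (pvLookupT T s) (pvCascadeT T m) := by
  induction T with
  | nil => rfl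
  | cons e T ih =>
      simp only [List.map_cons, List.pairwise_cons] at hT
      obtain ⟨hlt, htail⟩ := hT
      simp only [pvCascadeT, pvLookupT, pv_any_cons]
      by_cases hc : e.2.2.contains s = true
      · rw [if_pos hc,
          if_pos (show (e.2.2.contains s || e.2.2.any fun t => m.contains t) = true by
            rw [hc, Bool.true_or])]
        by_cases hd : (e.2.2.any fun t => m.contains t) = true
        · rw [if_pos hd]
          simp [pvMinR]
        · rw [if_neg hd]
          cases hcm : pvCascadeT T m with
          | none => rfl
          | some p =>
              have hp : e.1 < p.1 := hlt p.1 (pvCascadeT_rank_mem T m p hcm)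
              simp [pvMinR, not_lt.mpr (le_of_lt hp)]
      · have hc' : e.2.2.contains s = false := by simpa using hc
        rw [if_neg hc]
        by_cases hd : (e.2.2.any fun t => m.contains t) = true
        · rw [if_pos hd,
            if_pos (show (e.2.2.contains s || e.2.2.any fun t => m.contains t) = true by
              rw [hc', Bool.false_or, hd])]
          cases hls : pvLookupT T s with
          | none => rfl
          | some q =>
              have hq : e.1 < q.1 := hlt q.1 (pvLookupT_rank_mem T s q hls)
              simp [pvMinR, hq]
        · rw [if_neg hd,
            if_neg (show ¬((e.2.2.contains s || e.2.2.any fun t => m.contains t) = true) by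
              rw [hc', Bool.false_or]; exact hd)]
          exact ih htail

-- a per-group find? computation used to relate the inverted index to the table lookup
theorem pv_find?_map_const (kws : List String) (v : Int × String) (s : String) :
    ((kws.map (fun kw => (kw, v))).find? (fun p => p.1 == s)).map (fun p => p.2) =
      (if kws.contains s then some v else none) := by
  induction kws with
  | nil => rfl
  | cons k kws ih =>
      by_cases hk : k = s
      · subst hk
        rw [List.map_cons, List.find?_cons_of_pos (by simp)]
        simp
      · rw [List.map_cons, List.find?_cons_of_neg (by simp [hk]), List.contains_cons,
          show (s == k) = false from by simp [Ne.symm hk]]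
        simpa using ih

-- the inverted index built from any table is the table's first-match lookup
theorem pv_find?_flatMap (T : List (Int × String × List String)) (s : String) :
    ((T.flatMap (fun e => e.2.2.map (fun kw => (kw, (e.1, e.2.1))))).find?
        (fun p => p.1 == s)).map (fun p => p.2) = pvLookupT T s := by
  induction T with
  | nil => rfl
  | cons e T ih =>
      rw [List.flatMap_cons, List.find?_append]
      have h1 := pv_find?_map_const e.2.2 (e.1, e.2.1) s
      by_cases hc : e.2.2.contains s = true
      · rw [if_pos hc] at h1
        cases hf : (e.2.2.map (fun kw => (kw, (e.1, e.2.1)))).find? (fun p => p.1 == s) with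
        | none => rw [hf] at h1; simp at h1
        | some p =>
            rw [hf] at h1
            simp only [Option.map_some, Option.some.injEq] at h1
            unfold pvLookupT
            rw [if_pos hc]
            simp [h1]
      · rw [if_neg hc] at h1
        have hf0 : (e.2.2.map (fun kw => (kw, (e.1, e.2.1)))).find? (fun p => p.1 == s) = none := by
          cases hf : (e.2.2.map (fun kw => (kw, (e.1, e.2.1)))).find? (fun p => p.1 == s) with
          | none => rfl
          | some p => rw [hf] at h1; simp at h1
        unfold pvLookupT
        rw [if_neg hc, hf0]
        simpa using ih

-- looking up a lowered tag in the dict-comprehension index is the table lookup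
theorem pv_kwRank_eq (s : String) :
    PySem.Dict.get? pvKeywordRank s = pvLookupT pvRankTable s := by
  have h : pvKeywordRank = PySem.Dict.mk
      (pvRankTable.flatMap (fun e => e.2.2.map (fun kw => (kw, (e.1, e.2.1))))) := by decide
  rw [h]
  have hunfold : PySem.Dict.get?
      (PySem.Dict.mk (pvRankTable.flatMap (fun e => e.2.2.map (fun kw => (kw, (e.1, e.2.1)))))) s
      = ((pvRankTable.flatMap (fun e => e.2.2.map (fun kw => (kw, (e.1, e.2.1))))).find?
          (fun p => p.1 == s)).map (fun p => p.2) := by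
    simp [PySem.Dict.get?]
  rw [hunfold, pv_find?_flatMap]

-- the fold step is exactly pvMinR with the looked-up rank
theorem pv_step_eq (best : Option (Int × String)) (t : String) :
    (match PySem.Dict.get? pvKeywordRank (PySem.Str.lower t) with
      | none => best
      | some r =>
        match best with
        | none => some r
        | some b => if r.1 < b.1 then some r else best) =
    pvMinR best (PySem.Dict.get? pvKeywordRank (PySem.Str.lower t)) := by
  cases PySem.Dict.get? pvKeywordRank (PySem.Str.lower t) <;> cases best <;> rfl

-- the single-pass fold computes the cascade's winner
theorem pv_fold_eq (tags : List String) (best : Option (Int × String)) :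
    tags.foldl
      (fun best t =>
        match PySem.Dict.get? pvKeywordRank (PySem.Str.lower t) with
        | none => best
        | some r =>
          match best with
          | none => some r
          | some b => if r.1 < b.1 then some r else best)
      best = pvMinR best (pvCascadeT pvRankTable (tags.map PySem.Str.lower)) := by
  induction tags generalizing best with
  | nil =>
      simp only [List.foldl_nil, List.map_nil]
      rw [show pvCascadeT pvRankTable [] = none from rfl, pvMinR_none_right]
  | cons t l ih =>
      rw [List.foldl_cons, ih, pv_step_eq, pv_kwRank_eq, List.map_cons,
        pv_cascade_cons_gen pvRankTable (by decide), ← pvMinR_assoc]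

-- ===== VERDICT (by name: the statement is the Claim_ definition above) =====
theorem determine_archetype_py_spec : Claim_equal_determine_archetype_py := by
  intro tags _
  unfold Spec_determine_archetype_py determine_archetype_py_alt
  rw [pv_A_eq_cascade, pv_fold_eq]
  rfl
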